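-- pv_equiv track=rewrite | github.com/pypi-data/pypi-mirror-383 | packages/buzzerboy-saas-tenants/buzzerboy_saas_tenants-0.121.3.tar.gz/buzzerboy_saas_tenants-0.121.3/buzzerboy_saas_tenants/saas_tenants/models/accounts.py | read_str_to_dict
-- ===== SOURCE A (Python) =====
-- def read_str_to_dict (str):
--     lines = str.strip().splitlines()
--     dict = {}
--     cols = []
--     firstrow = []
--     i = 0
--     j = 0
--     for row in lines:
--         cols = row.__str__().split(", ")
--         for col in cols:
--             dict [i] = col
--             i+=1
--         i=0
--     return dict
-- ===== SOURCE B (Python) =====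
-- def read_str_to_dict(str):
--     # Only the final line's fields matter: earlier rows are discarded.
--     lines = str.strip().splitlines()
--     if not lines:
--         return {}
--     return {i: col for i, col in enumerate(lines[-1].split(", "))}
-- ===== Notes on version B (the rewrite author's own statement) =====
-- stated objective: simpler
-- what changed: B drops A's nested loop over all lines (which writes every row's fields into the dict at indices reset per row) and builds the result from the last line alone: strip, splitlines, return {} if empty, else enumerate the last line's comma-space-split fields.
-- intended difference: When some earlier line splits into more comma-space-separated fields than the last line, A returns the last line's fields plus stale leftover fields of longer earlier lines at the higher indices (its index counter resets per row but old dict keys survive); B returns exactly the last line's fields, the intended value since every earlier row's data is otherwise overwritten and discarded. — e.g. on read_str_to_dict("a, b\nc"): A returns [(0, "c"), (1, "b")], B returns [(0, "c")]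
import Mathlib
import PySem

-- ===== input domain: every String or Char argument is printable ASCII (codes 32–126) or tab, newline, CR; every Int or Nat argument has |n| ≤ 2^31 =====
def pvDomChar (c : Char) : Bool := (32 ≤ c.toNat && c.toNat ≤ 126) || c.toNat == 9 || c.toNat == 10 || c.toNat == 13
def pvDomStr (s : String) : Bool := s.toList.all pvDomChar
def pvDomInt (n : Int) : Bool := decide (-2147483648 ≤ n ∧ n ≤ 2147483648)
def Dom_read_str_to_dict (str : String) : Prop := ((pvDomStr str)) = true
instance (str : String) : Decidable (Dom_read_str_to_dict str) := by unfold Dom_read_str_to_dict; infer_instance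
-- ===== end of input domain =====

-- B builds the result from the last line alone (every earlier row's data is discarded by A
-- except leftover high indices from longer earlier rows, stated below as D_): simpler.

-- ===== PORT A =====
def read_str_to_dict (str : String) : List (Int × String) :=
  let lines := PySem.Str.splitlines (PySem.Str.strip str)
  let st := lines.foldl (fun (st : PySem.Dict Int String × Int) row =>
      let cols := (PySem.Str.split? row ", ").getD []   -- sep is the literal ", " ≠ "", so split? is always some
      let st2 := cols.foldl (fun (st : PySem.Dict Int String × Int) col =>
          (st.1.insert st.2 col, st.2 + 1)) st
      (st2.1, 0))
    (PySem.Dict.empty, 0)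
  st.1.items

-- ===== PORT B =====
def read_str_to_dict_alt (str : String) : List (Int × String) :=
  let lines := PySem.Str.splitlines (PySem.Str.strip str)
  if lines.isEmpty then []
  else
    let last := (PySem.List.pyGet? lines (-1)).getD ""   -- lines[-1]; the guard makes the index in range
    let cols := (PySem.Str.split? last ", ").getD []     -- sep is the literal ", " ≠ "", so split? is always some
    ((PySem.List.enumerate cols).foldl
        (fun (d : PySem.Dict Int String) p => d.insert p.1 p.2) PySem.Dict.empty).items

-- ===== PRECONDITION & SPEC =====
-- When some earlier line splits into more comma-space-separated fields than the last line, A returns the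
-- last line's fields plus stale leftover fields of longer earlier lines at the higher indices
-- (its index counter resets per row but old dict keys survive); B returns exactly the last line's
-- fields, the intended value since every earlier row's data is otherwise overwritten and discarded.
-- number of comma-space-separated fields of one line (used only to state D_)
def pvFields (row : String) : Nat := (PySem.Chars.splitOn row.toList ", ".toList).length

def D_read_str_to_dict (str : String) : Prop :=
  let lines := PySem.Str.splitlines (PySem.Str.strip str)
  lines ≠ [] ∧ ∃ row ∈ lines.dropLast, pvFields (lines.getLast?.getD "") < pvFields row
instance (str : String) : Decidable (D_read_str_to_dict str) := by unfold D_read_str_to_dict; infer_instance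

def Spec_read_str_to_dict (str : String) (out : List (Int × String)) : Prop :=
  ¬ D_read_str_to_dict str → out = read_str_to_dict_alt str
instance (str : String) (out : List (Int × String)) : Decidable (Spec_read_str_to_dict str out) := by unfold Spec_read_str_to_dict; infer_instance

def pvDiffWitness_read_str_to_dict : String := "a, b\nc"
def pvDiffWitnessOut_read_str_to_dict : (List (Int × String)) × (List (Int × String)) :=
  ([(0, "c"), (1, "b")], [(0, "c")])

-- ===== CLAIM =====
def Claim_unchanged_read_str_to_dict : Prop := ∀ (str : String), Dom_read_str_to_dict str → Spec_read_str_to_dict str (read_str_to_dict str)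
def Claim_changed_read_str_to_dict : Prop := Dom_read_str_to_dict (pvDiffWitness_read_str_to_dict) ∧ D_read_str_to_dict (pvDiffWitness_read_str_to_dict) ∧ read_str_to_dict (pvDiffWitness_read_str_to_dict) = pvDiffWitnessOut_read_str_to_dict.1 ∧ read_str_to_dict_alt (pvDiffWitness_read_str_to_dict) = pvDiffWitnessOut_read_str_to_dict.2 ∧ pvDiffWitnessOut_read_str_to_dict.1 ≠ pvDiffWitnessOut_read_str_to_dict.2
def Claim_exact_read_str_to_dict : Prop := ∀ (str : String), Dom_read_str_to_dict str → D_read_str_to_dict str → read_str_to_dict str ≠ read_str_to_dict_alt str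

-- ===== LEMMAS AND PROOFS =====

-- number of comma-space-separated fields of a row
def pvClen (row : String) : Nat := ((PySem.Str.split? row ", ").getD []).length
-- the list-side step A's dict loop simulates: a row's columns overwrite the buffer's prefix
def pvStep (out : List String) (row : String) : List String :=
  (PySem.Str.split? row ", ").getD [] ++ out.drop (pvClen row)

lemma pvStep_length (out : List String) (row : String) :
    (pvStep out row).length = max (pvClen row) out.length := by
  simp [pvStep, pvClen]; omega

-- mapping the "overwrite key k" function over an enumeration whose keys all exceed k is the identity
lemma map_overwrite_lt (xs : List String) (s k : Int) (c : String) (h : k < s) :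
    (PySem.List.enumerate xs s).map (fun p => if p.1 == k then (k, c) else p)
      = PySem.List.enumerate xs s := by
  induction xs generalizing s with
  | nil => simp [PySem.List.enumerate_nil]
  | cons x xs ih =>
      rw [PySem.List.enumerate_cons, List.map_cons, ih (s + 1) (by omega)]
      have : (s == k) = false := by simp; omega
      simp [this]

-- overwriting key s+m in an enumeration is enumeration of List.set
lemma map_overwrite_set (xs : List String) (s : Int) (m : Nat) (c : String)
    (h : m < xs.length) :
    (PySem.List.enumerate xs s).map (fun p => if p.1 == s + m then (s + m, c) else p)
      = PySem.List.enumerate (xs.set m c) s := by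
  induction xs generalizing s m with
  | nil => simp at h
  | cons x xs ih =>
      cases m with
      | zero =>
          rw [PySem.List.enumerate_cons, List.map_cons]
          simp only [List.set_cons_zero, PySem.List.enumerate_cons]
          have hk : ((s : Int) == s + (0 : Nat)) = true := by simp
          rw [if_pos hk]
          rw [map_overwrite_lt xs (s + 1) (s + (0 : Nat)) c (by simp)]
          simp
      | succ m =>
          rw [PySem.List.enumerate_cons, List.map_cons, List.set_cons_succ,
            PySem.List.enumerate_cons]
          have hk : ((s : Int) == s + ((m + 1 : Nat) : Int)) = false := by simp; omega
          rw [if_neg (by simp; omega)]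
          have := ih (s + 1) m (by simpa using h)
          have harith : s + ((m + 1 : Nat) : Int) = (s + 1) + (m : Nat) := by push_cast; ring
          rw [harith, this]

lemma insert_enum (out : List String) (m : Nat) (c : String) (d : PySem.Dict Int String)
    (hd : d.items = PySem.List.enumerate out 0) (hm : m ≤ out.length) :
    (d.insert (m : Int) c).items
      = PySem.List.enumerate (out.take m ++ c :: out.drop (m + 1)) 0 := by
  have hkeys : d.keys = PySem.List.pyRange 0 (out.length : Int) := by
    show d.items.map (fun p => p.1) = _
    rw [hd, PySem.List.map_fst_enumerate]; simp
  rcases Nat.lt_or_ge m out.length with hlt | hge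
  · have hc : d.contains (m : Int) = true := by
      rw [PySem.Dict.contains_eq_decide_mem_keys, hkeys]
      simp [PySem.List.mem_pyRange_one]; omega
    rw [PySem.Dict.items_insert, if_pos hc, hd]
    have := map_overwrite_set out 0 m c hlt
    simp only [zero_add] at this
    rw [this, List.set_eq_take_append_cons_drop, if_pos hlt]
  · have hml : m = out.length := le_antisymm hm hge
    have hc : d.contains (m : Int) = false := by
      rw [PySem.Dict.contains_eq_decide_mem_keys, hkeys]
      simp [PySem.List.mem_pyRange_one]; omega
    rw [PySem.Dict.items_insert, if_neg (by simp [hc]), hd]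
    subst hml
    have h1 : out.take out.length = out := List.take_length
    have h2 : out.drop (out.length + 1) = [] := by
      apply List.drop_eq_nil_of_le; omega
    rw [h1, h2]
    rw [PySem.List.enumerate_append]
    simp [PySem.List.enumerate_cons, PySem.List.enumerate_nil]

-- the inner loop of A (write cols at indices m, m+1, …) is prefix replacement on the list side
lemma inner_loop (cols : List String) (m : Nat) (out : List String)
    (d : PySem.Dict Int String)
    (hd : d.items = PySem.List.enumerate out 0) (hm : m ≤ out.length) :
    (cols.foldl (fun (st : PySem.Dict Int String × Int) col =>
        (st.1.insert st.2 col, st.2 + 1)) (d, (m : Int))).1.items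
      = PySem.List.enumerate (out.take m ++ cols ++ out.drop (m + cols.length)) 0 := by
  induction cols generalizing m out d with
  | nil =>
      simp only [List.foldl_nil, List.append_nil, List.length_nil, Nat.add_zero]
      rw [hd, List.take_append_drop]
  | cons c cs ih =>
      simp only [List.foldl_cons]
      set out₂ := out.take m ++ c :: out.drop (m + 1) with hout₂
      have hd₂ : (d.insert (m : Int) c).items = PySem.List.enumerate out₂ 0 :=
        insert_enum out m c d hd hm
      have hlen₂ : out₂.length = max out.length (m + 1) := by
        simp [hout₂]; omega
      have hm₂ : m + 1 ≤ out₂.length := by omega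
      have hcast : ((m : Int) + 1) = ((m + 1 : Nat) : Int) := by push_cast; ring
      rw [hcast]
      rw [ih (m + 1) out₂ _ hd₂ hm₂]
      congr 1
      have hlentk : (out.take m).length = m := by simp; omega
      have h1 : out₂.take (m + 1) = out.take m ++ [c] := by
        rw [hout₂, List.take_append, hlentk]
        simp
      have h2 : out₂.drop (m + 1 + cs.length) = out.drop (m + (c :: cs).length) := by
        rw [hout₂, List.drop_append, hlentk]
        have hdz : (out.take m).drop (m + 1 + cs.length) = [] := by
          apply List.drop_eq_nil_of_le; omega
        rw [hdz, List.nil_append]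
        rw [show m + 1 + cs.length - m = cs.length + 1 from by omega,
          List.drop_succ_cons, List.drop_drop]
        congr 1
        simp; omega
      rw [h1, h2]
      simp

-- the outer loop: A's dict tracks the list-side fold of pvStep
lemma outer_loop (lines : List String) (d : PySem.Dict Int String) (out : List String)
    (hd : d.items = PySem.List.enumerate out 0) :
    (lines.foldl (fun (st : PySem.Dict Int String × Int) row =>
        let cols := (PySem.Str.split? row ", ").getD []
        let st2 := cols.foldl (fun (st : PySem.Dict Int String × Int) col =>
            (st.1.insert st.2 col, st.2 + 1)) st
        (st2.1, 0)) (d, 0)).1.items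
      = PySem.List.enumerate (lines.foldl pvStep out) 0 := by
  induction lines generalizing d out with
  | nil => simpa using hd
  | cons row rows ih =>
      simp only [List.foldl_cons]
      have hinner := inner_loop ((PySem.Str.split? row ", ").getD []) 0 out d hd (Nat.zero_le _)
      simp only [List.take_zero, List.nil_append, Nat.zero_add] at hinner
      have : (((PySem.Str.split? row ", ").getD []).foldl (fun (st : PySem.Dict Int String × Int) col =>
          (st.1.insert st.2 col, st.2 + 1)) (d, ((0 : Nat) : Int))).1.items
            = PySem.List.enumerate (pvStep out row) 0 := by
        simpa [pvStep, pvClen] using hinner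
      exact ih _ _ this

-- fold lengths: the buffer never shrinks and reaches every row's field count
lemma fold_len_le (rows : List String) (out : List String) (m : Nat)
    (h0 : out.length ≤ m) (h : ∀ r ∈ rows, pvClen r ≤ m) :
    (rows.foldl pvStep out).length ≤ m := by
  induction rows generalizing out with
  | nil => simpa using h0
  | cons r rs ih =>
      simp only [List.foldl_cons]
      exact ih (pvStep out r)
        (by rw [pvStep_length]; have := h r (by simp); omega)
        (fun x hx => h x (by simp [hx]))

lemma fold_len_ge_init (rows : List String) (out : List String) :
    out.length ≤ (rows.foldl pvStep out).length := by
  induction rows generalizing out with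
  | nil => simp
  | cons r rs ih =>
      simp only [List.foldl_cons]
      have := ih (pvStep out r)
      rw [pvStep_length] at this; omega

lemma fold_len_ge_mem (rows : List String) (out : List String) (r : String) (hr : r ∈ rows) :
    pvClen r ≤ (rows.foldl pvStep out).length := by
  induction rows generalizing out with
  | nil => simp at hr
  | cons x xs ih =>
      simp only [List.foldl_cons]
      rcases List.mem_cons.1 hr with h | h
      · subst h
        have := fold_len_ge_init xs (pvStep out r)
        rw [pvStep_length] at this; omega
      · exact ih _ h

-- B's enumerate-comprehension dict has exactly the enumeration as items
lemma b_items (cols : List String) :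
    ((PySem.List.enumerate cols).foldl
        (fun (d : PySem.Dict Int String) p => d.insert p.1 p.2) PySem.Dict.empty).items
      = PySem.List.enumerate cols 0 := by
  have hfresh : ∀ a ∈ PySem.List.enumerate cols 0,
      (PySem.Dict.empty : PySem.Dict Int String).contains a.1 = false := by
    intro a _; simp
  have hnd : ((PySem.List.enumerate cols 0).map (fun p => p.1)).Nodup := by
    rw [List.nodup_iff_pairwise_ne, List.pairwise_map]
    exact (PySem.List.pairwise_lt_enumerate cols 0).imp (fun h => by omega)
  have hB := PySem.Dict.items_foldl_insert_fresh (PySem.List.enumerate cols 0)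
    (fun p => p.1) (fun p => p.2) PySem.Dict.empty hfresh hnd
  have he : (PySem.Dict.empty : PySem.Dict Int String).items = [] := rfl
  rw [show (PySem.List.enumerate cols = PySem.List.enumerate cols 0) from rfl]
  rw [hB, he]; simp

-- A's result in list form
lemma a_eq_enum (s : String) :
    read_str_to_dict s
      = PySem.List.enumerate ((PySem.Str.splitlines (PySem.Str.strip s)).foldl pvStep []) 0 := by
  unfold read_str_to_dict
  exact outer_loop _ PySem.Dict.empty [] (by rfl)

-- pvClen (the ports' field count) agrees with pvFields (the D_-side field count)
lemma pvClen_eq (row : String) : pvClen row = pvFields row := by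
  have h := PySem.Str.split?_map row ", "
  cases hs : PySem.Str.split? row ", " with
  | none => rw [hs] at h; simp [PySem.Chars.split?] at h
  | some l =>
      rw [hs] at h
      simp [PySem.Chars.split?] at h
      have : l.length = (PySem.Chars.splitOn row.toList [',', ' ']).length := by
        rw [← h]; simp
      simpa [pvClen, pvFields, hs] using this

lemma pvClen_pyGet (lines : List String) :
    pvClen ((PySem.List.pyGet? lines (-1)).getD "") = pvFields (lines.getLast?.getD "") := by
  rw [PySem.List.pyGet?_neg_one, pvClen_eq]

-- abstract form of the unchanged claim, over the split line list
lemma unchanged_core (lines : List String)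
    (hle : ∀ r ∈ lines.dropLast, pvClen r ≤ pvClen ((PySem.List.pyGet? lines (-1)).getD "")) :
    PySem.List.enumerate (lines.foldl pvStep []) 0
      = if lines.isEmpty then ([] : List (Int × String)) else
          ((PySem.List.enumerate
              ((PySem.Str.split? ((PySem.List.pyGet? lines (-1)).getD "") ", ").getD [])).foldl
            (fun (d : PySem.Dict Int String) p => d.insert p.1 p.2) PySem.Dict.empty).items := by
  by_cases hemp : lines = []
  · simp [hemp, PySem.List.enumerate_nil]
  · rw [if_neg (by simpa [List.isEmpty_iff] using hemp)]
    have hlastv : (PySem.List.pyGet? lines (-1)).getD "" = lines.getLast hemp := by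
      rw [PySem.List.pyGet?_neg_one, List.getLast?_eq_getLast_of_ne_nil hemp]; rfl
    have hlines_eq : lines = lines.dropLast ++ [lines.getLast hemp] :=
      (List.dropLast_append_getLast hemp).symm
    have hfold : lines.foldl pvStep []
        = pvStep (lines.dropLast.foldl pvStep []) ((PySem.List.pyGet? lines (-1)).getD "") := by
      conv_lhs => rw [hlines_eq]
      rw [List.foldl_append, List.foldl_cons, List.foldl_nil, hlastv]
    have hlenle : (lines.dropLast.foldl pvStep []).length
        ≤ pvClen ((PySem.List.pyGet? lines (-1)).getD "") :=
      fold_len_le _ _ _ (by simp) hle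
    have hdrop : (lines.dropLast.foldl pvStep []).drop
        (pvClen ((PySem.List.pyGet? lines (-1)).getD "")) = [] :=
      List.drop_eq_nil_of_le hlenle
    rw [hfold,
      show pvStep (lines.dropLast.foldl pvStep []) ((PySem.List.pyGet? lines (-1)).getD "")
          = (PySem.Str.split? ((PySem.List.pyGet? lines (-1)).getD "") ", ").getD []
            ++ (lines.dropLast.foldl pvStep []).drop
                (pvClen ((PySem.List.pyGet? lines (-1)).getD "")) from rfl,
      hdrop, List.append_nil, b_items]

-- ===== VERDICT =====
theorem read_str_to_dict_spec : Claim_unchanged_read_str_to_dict := by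
  unfold Claim_unchanged_read_str_to_dict Spec_read_str_to_dict
  intro s _ hnd
  unfold D_read_str_to_dict at hnd
  rw [a_eq_enum s]
  show _ = read_str_to_dict_alt s
  unfold read_str_to_dict_alt
  refine unchanged_core _ ?_
  intro r hr
  by_contra hgt
  rw [pvClen_eq, pvClen_pyGet] at hgt
  exact hnd ⟨fun h => by simp [h] at hr, r, hr, by omega⟩

theorem read_str_to_dict_changed : Claim_changed_read_str_to_dict := by
  unfold Claim_changed_read_str_to_dict; decide

theorem read_str_to_dict_tight : Claim_exact_read_str_to_dict := by
  unfold Claim_exact_read_str_to_dict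
  intro s _ hd heq
  unfold D_read_str_to_dict at hd
  obtain ⟨hemp, r, hr, hlt⟩ := hd
  have hAlen : (read_str_to_dict s).length
      = ((PySem.Str.splitlines (PySem.Str.strip s)).foldl pvStep []).length := by
    rw [a_eq_enum s]; exact PySem.List.length_enumerate _ _
  have hBlen : (read_str_to_dict_alt s).length
      = pvClen ((PySem.List.pyGet? (PySem.Str.splitlines (PySem.Str.strip s)) (-1)).getD "") := by
    unfold read_str_to_dict_alt
    rw [if_neg (by simpa [List.isEmpty_iff] using hemp), b_items]
    exact PySem.List.length_enumerate _ _
  have hge : pvClen r ≤ ((PySem.Str.splitlines (PySem.Str.strip s)).foldl pvStep []).length :=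
    fold_len_ge_mem _ [] r (List.mem_of_mem_dropLast hr)
  have hne : (read_str_to_dict s).length ≠ (read_str_to_dict_alt s).length := by
    have hlt' : pvClen ((PySem.List.pyGet? (PySem.Str.splitlines (PySem.Str.strip s)) (-1)).getD "")
        < pvClen r := by rw [pvClen_pyGet, pvClen_eq]; exact hlt
    rw [hAlen, hBlen]
    omega
  exact hne (by rw [heq])
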